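-- pv_equiv track=rewrite | github.com/kth5711/MTPlayer | scene_analysis/core/cache.py | _normalize_scene_ms
-- ===== SOURCE A (Python) =====
-- from typing import Any, Dict, List, Optional
--
-- def _normalize_scene_ms(scene_ms: List[int]) -> List[int]:
--     if scene_ms is None:
--         items = []
--     else:
--         try:
--             items = scene_ms.tolist() if hasattr(scene_ms, "tolist") else list(scene_ms)
--         except Exception:
--             items = [scene_ms]
--     out = []
--     seen = set()
--     for value in items:
--         try:
--             ms = int(value)
--         except Exception:
--             continue
--         if ms < 0 or ms in seen:
--             continue
--         seen.add(ms)
--         out.append(ms)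
--     return sorted(out)
-- ===== SOURCE B (Python) =====
-- from typing import Any, Dict, List, Optional
--
-- def _normalize_scene_ms(scene_ms: List[int]) -> List[int]:
--     if scene_ms is None:
--         items = []
--     else:
--         try:
--             items = scene_ms.tolist() if hasattr(scene_ms, "tolist") else list(scene_ms)
--         except Exception:
--             items = [scene_ms]
--     vals = []
--     for value in items:
--         try:
--             ms = int(value)
--         except Exception:
--             continue
--         if ms >= 0:
--             vals.append(ms)
--     vals.sort()
--     out = []
--     for ms in vals:
--         if not out or out[-1] != ms:
--             out.append(ms)
--     return out
-- ===== Notes on version B (the rewrite author's own statement) =====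
-- stated objective: alternative
-- what changed: B drops the membership set entirely: it collects all non-negative values (duplicates included), sorts once, and removes duplicates in a second pass via sorted adjacency (compare with out[-1]) instead of maintaining a seen-set during the first pass.
import Mathlib
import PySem

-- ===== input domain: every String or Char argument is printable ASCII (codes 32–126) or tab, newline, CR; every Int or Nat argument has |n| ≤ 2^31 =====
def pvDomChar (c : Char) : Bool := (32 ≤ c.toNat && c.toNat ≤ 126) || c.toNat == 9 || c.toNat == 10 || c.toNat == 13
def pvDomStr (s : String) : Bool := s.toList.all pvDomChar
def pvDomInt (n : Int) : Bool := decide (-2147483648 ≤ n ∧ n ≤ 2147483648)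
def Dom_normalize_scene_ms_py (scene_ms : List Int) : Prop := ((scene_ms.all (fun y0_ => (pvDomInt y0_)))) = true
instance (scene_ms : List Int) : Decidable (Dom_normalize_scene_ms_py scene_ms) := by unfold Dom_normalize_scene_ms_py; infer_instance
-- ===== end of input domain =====

-- B removes the seen-set: it keeps duplicates through the first pass, sorts, and dedups by sorted adjacency; same value, same cost.

-- ===== PORT A =====
-- On a List Int argument, Python's `items = list(scene_ms)` is the list itself and `int(value)` never raises.
def normalize_scene_ms_py (scene_ms : List Int) : List Int :=
  let st := scene_ms.foldl
    (fun (st : List Int × PySem.Set Int) value =>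
      if value < 0 ∨ PySem.Set.contains st.2 value then st
      else (st.1 ++ [value], PySem.Set.add st.2 value))
    ([], PySem.Set.empty)
  PySem.List.sorted st.1 (fun x => x) false

-- ===== PORT B =====
def normalize_scene_ms_py_alt (scene_ms : List Int) : List Int :=
  let vals := scene_ms.foldl (fun acc value => if value ≥ 0 then acc ++ [value] else acc) []
  let sortedVals := PySem.List.sorted vals (fun x => x) false
  sortedVals.foldl (fun out ms => if out = [] ∨ out.getLast? ≠ some ms then out ++ [ms] else out) []

-- ===== PRECONDITION & SPEC =====
def Spec_normalize_scene_ms_py (scene_ms : List Int) (out : List Int) : Prop := out = normalize_scene_ms_py_alt scene_ms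
instance (scene_ms : List Int) (out : List Int) : Decidable (Spec_normalize_scene_ms_py scene_ms out) := by unfold Spec_normalize_scene_ms_py; infer_instance

-- ===== CLAIM (what is proved, stated in full; the proofs are below) =====
def Claim_equal_normalize_scene_ms_py : Prop := ∀ (scene_ms : List Int), Dom_normalize_scene_ms_py scene_ms → Spec_normalize_scene_ms_py scene_ms (normalize_scene_ms_py scene_ms)

-- ===== LEMMAS AND PROOFS =====

-- A's loop: the accumulated list stays Nodup and collects exactly the non-negative members.
theorem aLoop_inv (l : List Int) (out : List Int) (seen : PySem.Set Int)
    (hnd : out.Nodup) (hms : ∀ x, x ∈ seen ↔ x ∈ out) :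
    (l.foldl
      (fun (st : List Int × PySem.Set Int) value =>
        if value < 0 ∨ PySem.Set.contains st.2 value then st
        else (st.1 ++ [value], PySem.Set.add st.2 value))
      (out, seen)).1.Nodup ∧
    ∀ x, x ∈ (l.foldl
      (fun (st : List Int × PySem.Set Int) value =>
        if value < 0 ∨ PySem.Set.contains st.2 value then st
        else (st.1 ++ [value], PySem.Set.add st.2 value))
      (out, seen)).1 ↔ (x ∈ out ∨ (x ∈ l ∧ 0 ≤ x)) := by
  induction l generalizing out seen with
  | nil =>
    refine ⟨hnd, fun x => ?_⟩
    simp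
  | cons v t ih =>
    simp only [List.foldl_cons]
    by_cases hc : v < 0 ∨ v ∈ seen
    · have heq : (if v < 0 ∨ PySem.Set.contains seen v then ((out, seen) : List Int × PySem.Set Int)
          else (out ++ [v], PySem.Set.add seen v)) = (out, seen) := by
        rcases hc with h | h
        · simp [h]
        · simp [h]
      rw [heq]
      obtain ⟨h1, h2⟩ := ih out seen hnd hms
      refine ⟨h1, fun x => ?_⟩
      rw [h2 x]
      constructor
      · rintro (hx | ⟨hx, hx0⟩)
        · exact Or.inl hx
        · exact Or.inr ⟨List.mem_cons_of_mem _ hx, hx0⟩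
      · rintro (hx | ⟨hx, hx0⟩)
        · exact Or.inl hx
        · rcases List.mem_cons.mp hx with rfl | hx
          · rcases hc with hneg | hin
            · omega
            · exact Or.inl ((hms x).mp hin)
          · exact Or.inr ⟨hx, hx0⟩
    · push_neg at hc
      have heq : (if v < 0 ∨ PySem.Set.contains seen v then ((out, seen) : List Int × PySem.Set Int)
          else (out ++ [v], PySem.Set.add seen v)) = (out ++ [v], PySem.Set.add seen v) := by
        have h1 : ¬ (v < 0) := by omega
        simp [h1, hc.2]
      rw [heq]
      have hvout : v ∉ out := fun h => hc.2 ((hms v).mpr h)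
      have hnd' : (out ++ [v]).Nodup := by
        simp [List.nodup_append, hnd]
        intro a ha hav
        exact hvout (hav ▸ ha)
      have hms' : ∀ x, x ∈ PySem.Set.add seen v ↔ x ∈ out ++ [v] := by
        intro x
        rw [PySem.Set.mem_add, List.mem_append]
        constructor
        · rintro (h | rfl)
          · exact Or.inl ((hms x).mp h)
          · exact Or.inr (by simp)
        · rintro (h | h)
          · exact Or.inl ((hms x).mpr h)
          · simp at h; exact Or.inr h
      obtain ⟨h1, h2⟩ := ih (out ++ [v]) (PySem.Set.add seen v) hnd' hms'
      refine ⟨h1, fun x => ?_⟩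
      rw [h2 x]
      constructor
      · rintro (hx | ⟨hx, hx0⟩)
        · rcases List.mem_append.mp hx with hx | hx
          · exact Or.inl hx
          · simp at hx; subst hx
            exact Or.inr ⟨List.mem_cons_self, by omega⟩
        · exact Or.inr ⟨List.mem_cons_of_mem _ hx, hx0⟩
      · rintro (hx | ⟨hx, hx0⟩)
        · exact Or.inl (List.mem_append_left _ hx)
        · rcases List.mem_cons.mp hx with rfl | hx
          · exact Or.inl (List.mem_append_right _ (by simp))
          · exact Or.inr ⟨hx, hx0⟩

-- In a strictly increasing list, every element is ≤ the last.
theorem le_getLast_of_pairwise_lt (l : List Int) (m : Int)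
    (hp : l.Pairwise (· < ·)) (hm : l.getLast? = some m) : ∀ a ∈ l, a ≤ m := by
  obtain ⟨ys, rfl⟩ := List.getLast?_eq_some_iff.mp hm
  rw [List.pairwise_append] at hp
  intro a ha
  rcases List.mem_append.mp ha with ha | ha
  · exact le_of_lt (hp.2.2 a ha m (by simp))
  · simp at ha; omega

-- B's adjacency-dedup loop: from a strictly increasing accumulator whose last element
-- bounds the (sorted) remaining input, it produces a strictly increasing list with
-- membership acc ∪ vals.
theorem bLoop_inv (vals acc : List Int)
    (hacc : acc.Pairwise (· < ·))
    (hv : vals.Pairwise (· ≤ ·))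
    (hle : ∀ m, acc.getLast? = some m → ∀ v ∈ vals, m ≤ v) :
    (vals.foldl (fun out ms => if out = [] ∨ out.getLast? ≠ some ms then out ++ [ms] else out) acc).Pairwise (· < ·) ∧
    ∀ x, x ∈ (vals.foldl (fun out ms => if out = [] ∨ out.getLast? ≠ some ms then out ++ [ms] else out) acc) ↔ (x ∈ acc ∨ x ∈ vals) := by
  induction vals generalizing acc with
  | nil =>
    refine ⟨hacc, fun x => ?_⟩
    simp
  | cons v t ih =>
    simp only [List.foldl_cons]
    have hvt : ∀ y ∈ t, v ≤ y := fun y hy => (List.pairwise_cons.mp hv).1 y hy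
    have hv' : t.Pairwise (· ≤ ·) := (List.pairwise_cons.mp hv).2
    by_cases hc : acc = [] ∨ acc.getLast? ≠ some v
    · have heq : (if acc = [] ∨ acc.getLast? ≠ some v then acc ++ [v] else acc) = acc ++ [v] := by
        simp only [if_pos hc]
      rw [heq]
      have hacc' : (acc ++ [v]).Pairwise (· < ·) := by
        rw [List.pairwise_append]
        refine ⟨hacc, by simp, fun a ha b hb => ?_⟩
        rw [List.mem_singleton] at hb
        rw [hb]
        have hne : acc ≠ [] := by rintro rfl; simp at ha
        obtain ⟨m, hm⟩ := Option.isSome_iff_exists.mp (List.getLast?_isSome.mpr hne)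
        have h1 : a ≤ m := le_getLast_of_pairwise_lt acc m hacc hm a ha
        have h2 : m ≤ v := hle m hm v List.mem_cons_self
        have h3 : m ≠ v := by
          intro h; subst h
          rcases hc with h | h
          · exact hne h
          · exact h hm
        omega
      have hle' : ∀ m, (acc ++ [v]).getLast? = some m → ∀ y ∈ t, m ≤ y := by
        intro m hm y hy
        simp at hm; subst hm
        exact hvt y hy
      obtain ⟨h1, h2⟩ := ih (acc ++ [v]) hacc' hv' hle'
      refine ⟨h1, fun x => ?_⟩
      rw [h2 x]
      constructor
      · rintro (hx | hx)
        · rcases List.mem_append.mp hx with hx | hx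
          · exact Or.inl hx
          · simp at hx; subst hx; exact Or.inr List.mem_cons_self
        · exact Or.inr (List.mem_cons_of_mem _ hx)
      · rintro (hx | hx)
        · exact Or.inl (List.mem_append_left _ hx)
        · rcases List.mem_cons.mp hx with rfl | hx
          · exact Or.inl (List.mem_append_right _ (by simp))
          · exact Or.inr hx
    · push_neg at hc
      have heq : (if acc = [] ∨ acc.getLast? ≠ some v then acc ++ [v] else acc) = acc := by
        simp [hc.1, hc.2]
      rw [heq]
      have hle' : ∀ m, acc.getLast? = some m → ∀ y ∈ t, m ≤ y :=
        fun m hm y hy => hle m hm y (List.mem_cons_of_mem _ hy)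
      obtain ⟨h1, h2⟩ := ih acc hacc hv' hle'
      refine ⟨h1, fun x => ?_⟩
      rw [h2 x]
      have hvin : v ∈ acc := List.mem_of_getLast? hc.2
      constructor
      · rintro (hx | hx)
        · exact Or.inl hx
        · exact Or.inr (List.mem_cons_of_mem _ hx)
      · rintro (hx | hx)
        · exact Or.inl hx
        · rcases List.mem_cons.mp hx with rfl | hx
          · exact Or.inl hvin
          · exact Or.inr hx

-- B's first pass is exactly the non-negative filter.
theorem filter_foldl (l : List Int) :
    l.foldl (fun acc value => if value ≥ 0 then acc ++ [value] else acc) [] =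
      l.filter (fun value => decide (0 ≤ value)) := by
  have h : ∀ acc : List Int, l.foldl (fun acc value => if value ≥ 0 then acc ++ [value] else acc) acc =
      acc ++ l.filter (fun value => decide (0 ≤ value)) := by
    induction l with
    | nil => simp
    | cons v t ih =>
      intro acc
      by_cases hv : 0 ≤ v
      · simp [hv, ih]
      · simp [hv, ih]
  simpa using h []

-- ===== VERDICT (by name: the statement is the Claim_ definition above) =====
theorem normalize_scene_ms_py_spec : Claim_equal_normalize_scene_ms_py := by
  intro scene_ms _
  unfold Spec_normalize_scene_ms_py normalize_scene_ms_py normalize_scene_ms_py_alt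
  simp only []
  obtain ⟨hand, hamem⟩ := aLoop_inv scene_ms [] PySem.Set.empty (by simp)
    (by intro x; simp [PySem.Set.empty])
  rw [filter_foldl]
  set vals := scene_ms.filter (fun value => decide (0 ≤ value)) with hvals
  set sv := PySem.List.sorted vals (fun x => x) false with hsv
  obtain ⟨hbp, hbmem⟩ := bLoop_inv sv [] (by simp) (by simpa using PySem.List.sorted_pairwise vals (fun x => x)) (by simp)
  set outA := (scene_ms.foldl
      (fun (st : List Int × PySem.Set Int) value =>
        if value < 0 ∨ PySem.Set.contains st.2 value then st
        else (st.1 ++ [value], PySem.Set.add st.2 value))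
      ([], PySem.Set.empty)).1 with houtA
  set outB := sv.foldl (fun out ms => if out = [] ∨ out.getLast? ≠ some ms then out ++ [ms] else out) [] with houtB
  have hbnd : outB.Nodup := hbp.imp (fun h => Int.ne_of_lt h)
  have hmemiff : ∀ x, x ∈ outB ↔ x ∈ outA := by
    intro x
    rw [hbmem x, hamem x]
    simp [hsv, PySem.List.mem_sorted, hvals, List.mem_filter, and_comm]
  have hperm : outB.Perm outA := (List.perm_ext_iff_of_nodup hbnd hand).mpr hmemiff
  exact PySem.List.sorted_eq_of_perm_of_pairwise_lt outA outB (fun x => x) hperm (by simpa using hbp)
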